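-- pv_equiv track=rewrite | github.com/Jumaruba/URI | Programação em python_URI_2327 (important)(accepted).py | colunas
-- ===== SOURCE A (Python) =====
-- def colunas(matriz, x, soma):
--     for coluna in range(x):
--         soma_agora = 0
--         for linha in range(x):
--             soma_agora += matriz[linha][coluna]
--         if soma_agora != soma:
--             return False  # soma_bool e -1
--
--     return True
-- ===== SOURCE B (Python) =====
-- def colunas(matriz, x, soma):
--     sums = [0] * x
--     for linha in range(x):
--         row = matriz[linha]
--         for coluna in range(x):
--             sums[coluna] += row[coluna]
--     return all(s == soma for s in sums)
-- ===== Notes on version B (the rewrite author's own statement) =====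
-- stated objective: alternative
-- what changed: Replaces the column-major nested loops with short-circuit per column by a single row-major pass that accumulates all column sums in a table and checks them against soma at the end.
-- outside the precondition, e.g. on colunas([[1], [2]], 2, 0): A returns False, B raises IndexError
import Mathlib
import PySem

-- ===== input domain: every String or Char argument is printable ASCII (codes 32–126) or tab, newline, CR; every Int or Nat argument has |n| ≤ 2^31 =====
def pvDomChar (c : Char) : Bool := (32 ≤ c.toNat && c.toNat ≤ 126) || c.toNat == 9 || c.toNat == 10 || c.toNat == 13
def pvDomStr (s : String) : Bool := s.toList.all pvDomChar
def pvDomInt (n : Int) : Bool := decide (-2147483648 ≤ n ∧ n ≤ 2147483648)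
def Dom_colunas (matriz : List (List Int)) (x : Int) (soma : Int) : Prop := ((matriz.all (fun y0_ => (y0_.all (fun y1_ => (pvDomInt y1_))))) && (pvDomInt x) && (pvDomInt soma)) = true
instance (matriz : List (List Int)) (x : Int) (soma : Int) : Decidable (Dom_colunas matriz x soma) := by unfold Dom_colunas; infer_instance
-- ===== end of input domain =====

-- B replaces A's column-major nested loops (short-circuiting per column) by one row-major
-- pass accumulating a table of column sums, checked against soma at the end (objective: alternative).

-- ===== PORT A =====
-- the outer 'for coluna in range(x)' with its early 'return False'
def colunasLoop (matriz : List (List Int)) (x : Int) (soma : Int) : List Int → Bool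
  | [] => true
  | coluna :: rest =>
    let soma_agora := (PySem.List.pyRange 0 x 1).foldl
      (fun acc linha => acc + PySem.List.pyGetD (PySem.List.pyGetD matriz linha []) coluna 0) 0
    if soma_agora ≠ soma then false else colunasLoop matriz x soma rest

def colunas (matriz : List (List Int)) (x : Int) (soma : Int) : Bool :=
  colunasLoop matriz x soma (PySem.List.pyRange 0 x 1)

-- ===== PORT B =====
def colunas_alt (matriz : List (List Int)) (x : Int) (soma : Int) : Bool :=
  let sums := (PySem.List.pyRange 0 x 1).foldl
    (fun sums linha =>
      let row := PySem.List.pyGetD matriz linha []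
      (PySem.List.pyRange 0 x 1).foldl
        (fun s coluna =>
          PySem.List.pySetD s coluna (PySem.List.pyGetD s coluna 0 + PySem.List.pyGetD row coluna 0))
        sums)
    (List.replicate x.toNat 0)
  sums.all (fun s => s == soma)

-- ===== PRECONDITION & SPEC =====
-- Pre_ excludes the ragged/too-small matrices where the x·x accesses matriz[linha][coluna] go out of
-- range: there A either raises IndexError or (if an earlier column already failed) short-circuits to
-- False before reaching the missing entry, while B's full row-major pass raises.
def Pre_colunas (matriz : List (List Int)) (x : Int) (soma : Int) : Prop :=
  0 < x → (x ≤ matriz.length ∧ ∀ row ∈ matriz.take x.toNat, x ≤ row.length)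
instance (matriz : List (List Int)) (x : Int) (soma : Int) : Decidable (Pre_colunas matriz x soma) := by
  unfold Pre_colunas; infer_instance

def pvWitness_colunas : List (List Int) × Int × Int := ([[1, 2], [3, 0]], 2, 4)

def Spec_colunas (matriz : List (List Int)) (x : Int) (soma : Int) (out : Bool) : Prop := out = colunas_alt matriz x soma
instance (matriz : List (List Int)) (x : Int) (soma : Int) (out : Bool) : Decidable (Spec_colunas matriz x soma out) := by unfold Spec_colunas; infer_instance

-- ===== CLAIM (what is proved, stated in full; the proofs are below) =====
def Claim_equal_colunas : Prop := ∀ (matriz : List (List Int)) (x : Int) (soma : Int), Dom_colunas matriz x soma → Pre_colunas matriz x soma → Spec_colunas matriz x soma (colunas matriz x soma)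

-- ===== LEMMAS AND PROOFS =====

-- the sum of column j over the first n rows of matriz (reference value both sides reach)
def colSum (matriz : List (List Int)) (n j : Nat) : Int :=
  ((List.range n).map (fun l => (matriz.getD l []).getD j 0)).sum

-- A's outer loop over any column list is an 'all' of per-column checks
theorem colunasLoop_eq_all (matriz : List (List Int)) (x : Int) (soma : Int) (cs : List Int) :
    colunasLoop matriz x soma cs
      = cs.all (fun coluna =>
          ((PySem.List.pyRange 0 x 1).foldl
            (fun acc linha => acc + PySem.List.pyGetD (PySem.List.pyGetD matriz linha []) coluna 0) 0)
          == soma) := by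
  induction cs with
  | nil => rfl
  | cons c cs ih =>
    simp only [colunasLoop, List.all_cons]
    by_cases h : (PySem.List.pyRange 0 x 1).foldl
        (fun acc linha => acc + PySem.List.pyGetD (PySem.List.pyGetD matriz linha []) c 0) 0 = soma
    · simp [h, ih]
    · simp [h]

-- A's inner loop is colSum
theorem innerA_eq_colSum (matriz : List (List Int)) (n j : Nat) :
    ((List.range n).map (fun k : Nat => (k : Int))).foldl
      (fun acc linha => acc + PySem.List.pyGetD (PySem.List.pyGetD matriz linha []) (j : Int) 0) 0
    = colSum matriz n j := by
  rw [List.foldl_map, PySem.List.foldl_add]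
  simp [colSum, PySem.List.pyGetD_natCast]

-- A, characterized: all columns j < n have colSum = soma
theorem colunas_eq (matriz : List (List Int)) (n : Nat) (soma : Int) :
    colunas matriz (n : Int) soma
      = (List.range n).all (fun j => colSum matriz n j == soma) := by
  unfold colunas
  rw [colunasLoop_eq_all, PySem.List.pyRange_zero_nat, List.all_map]
  congr 1
  funext j
  simp only [Function.comp_apply]
  rw [innerA_eq_colSum]

-- result of B's inner loop (one row folded in), pointwise
theorem innerB_getD (row : List Int) (m : Nat) (s : List Int) (j : Nat) (hj : j < s.length) :
    ((List.range m).foldl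
        (fun s k => s.set k (s.getD k 0 + row.getD k 0)) s).getD j 0
      = if j < m then s.getD j 0 + row.getD j 0 else s.getD j 0 := by
  induction m with
  | zero => simp
  | succ m ih =>
    rw [List.range_succ, List.foldl_append]
    have hlen : ((List.range m).foldl (fun s k => s.set k (s.getD k 0 + row.getD k 0)) s).length
        = s.length := by
      clear ih hj
      induction m with
      | zero => simp
      | succ m ih2 => rw [List.range_succ, List.foldl_append]; simpa using ih2
    simp only [List.foldl_cons, List.foldl_nil]
    have hset : ∀ (t : List Int) (k i : Nat) (v : Int), i < t.length →
        (t.set k v).getD i 0 = if k = i then v else t.getD i 0 := by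
      intro t k i v hi
      rcases Nat.lt_or_ge k t.length with hk | hk
      · rw [List.getD_eq_getElem _ _ (by simpa using hi), List.getElem_set]
        split_ifs <;> simp_all
      · rw [List.set_eq_of_length_le (by omega)]
        split_ifs with h
        · omega
        · rfl
    rw [hset _ m j _ (by omega)]
    by_cases hjm : m = j
    · subst hjm
      rw [ih]
      simp
    · rw [ih]
      by_cases h2 : j < m
      · simp [hjm, h2, Nat.lt_succ_of_lt h2]
      · have : ¬ j < m + 1 := by omega
        simp [hjm, h2, this]

theorem innerB_length (row : List Int) (m : Nat) (s : List Int) :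
    ((List.range m).foldl (fun s k => s.set k (s.getD k 0 + row.getD k 0)) s).length
      = s.length := by
  induction m with
  | zero => simp
  | succ m ih => rw [List.range_succ, List.foldl_append]; simpa using ih

theorem outerB_length (matriz : List (List Int)) (n : Nat) (L : List Nat) (s : List Int) :
    (L.foldl (fun s l =>
        (List.range n).foldl
          (fun s k => s.set k (s.getD k 0 + (matriz.getD l []).getD k 0)) s) s).length
      = s.length := by
  induction L generalizing s with
  | nil => rfl
  | cons l L ih =>
    rw [List.foldl_cons, ih, innerB_length]

-- B's outer loop: after folding rows L into s, entry j carries the partial column sum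
theorem outerB (matriz : List (List Int)) (n : Nat) (j : Nat) (hj : j < n) (L : List Nat)
    (s : List Int) (hs : s.length = n) :
    (L.foldl (fun s l =>
        (List.range n).foldl
          (fun s k => s.set k (s.getD k 0 + (matriz.getD l []).getD k 0)) s) s).getD j 0
      = s.getD j 0 + ((L.map (fun l => (matriz.getD l []).getD j 0)).sum) := by
  induction L generalizing s with
  | nil => simp
  | cons l L ih =>
    simp only [List.foldl_cons, List.map_cons, List.sum_cons]
    have h1 := innerB_getD (matriz.getD l []) n s j (by omega)
    have h2 := innerB_length (matriz.getD l []) n s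
    rw [ih _ (by rw [h2, hs]), h1]
    simp only [hj, if_pos]
    ring

-- B's fold phrased over pyRange/pyGetD/pySetD reduces to the pure-list fold
theorem altFold_eq (matriz : List (List Int)) (n : Nat) :
    (PySem.List.pyRange 0 (n : Int) 1).foldl
      (fun sums linha =>
        let row := PySem.List.pyGetD matriz linha []
        (PySem.List.pyRange 0 (n : Int) 1).foldl
          (fun s coluna =>
            PySem.List.pySetD s coluna (PySem.List.pyGetD s coluna 0 + PySem.List.pyGetD row coluna 0))
          sums)
      (List.replicate ((n : Int)).toNat 0)
    = (List.range n).foldl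
        (fun s l =>
          (List.range n).foldl
            (fun s k => s.set k (s.getD k 0 + (matriz.getD l []).getD k 0)) s)
        (List.replicate n 0) := by
  rw [PySem.List.pyRange_zero_nat, List.foldl_map]
  simp only [Int.toNat_natCast]
  congr 1
  funext s l
  rw [List.foldl_map]
  congr 1
  funext t k
  simp [PySem.List.pyGetD_natCast, PySem.List.pySetD_natCast]

-- ===== VERDICT (by name: the statement is the Claim_ definition above) =====
theorem colunas_spec : Claim_equal_colunas := by
  intro matriz x soma _hdom _hpre
  unfold Spec_colunas
  by_cases hx : 0 ≤ x
  case neg =>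
    -- x < 0: range empty on both sides; both return True
    have h1 : PySem.List.pyRange 0 x 1 = [] := PySem.List.pyRange_one_eq_nil (by omega)
    have h2 : x.toNat = 0 := by omega
    simp [colunas, colunas_alt, h1, h2, colunasLoop]
  case pos =>
    obtain ⟨n, rfl⟩ : ∃ n : Nat, x = (n : Int) := ⟨x.toNat, by omega⟩
    rw [colunas_eq matriz n soma]
    simp only [colunas_alt]
    rw [altFold_eq matriz n]
    set final := (List.range n).foldl
        (fun s l =>
          (List.range n).foldl
            (fun s k => s.set k (s.getD k 0 + (matriz.getD l []).getD k 0)) s)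
        (List.replicate n 0) with hfinal
    have hlen : final.length = n := by
      rw [hfinal, outerB_length]; simp
    have hgd : ∀ j, j < n → final.getD j 0 = colSum matriz n j := by
      intro j hj
      rw [hfinal, outerB matriz n j hj (List.range n) _ (by simp)]
      simp [colSum]
    rw [Bool.eq_iff_iff, List.all_eq_true, List.all_eq_true]
    constructor
    · intro h v hv
      obtain ⟨i, hi, rfl⟩ := List.mem_iff_getElem.mp hv
      have hi' : i < n := by omega
      have hx2 := h i (List.mem_range.mpr hi')
      have hg := hgd i hi'
      rw [List.getD_eq_getElem _ _ hi] at hg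
      rw [hg]
      simpa using hx2
    · intro h j hj
      simp only [List.mem_range] at hj
      have hg := hgd j hj
      rw [List.getD_eq_getElem _ _ (by omega)] at hg
      have hv := h (final[j]'(by omega)) (List.getElem_mem _)
      rw [hg] at hv
      simpa using hv
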